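-- pv_equiv track=rewrite | github.com/ryanurbs/ExSTraCS_2.0 | RBA/multisurf.py | makeClassPairMap
-- ===== SOURCE A (Python) =====
-- def makeClassPairMap(multiclass_map):
--     #finding number of classes in the dataset and storing them into the map
--     classPair_map={}
--     for each in multiclass_map:
--         for other in multiclass_map:
--             if each != other:
--                 locator = [each,other]
--                 locator = sorted(locator, reverse = True)
--                 tempString = str(locator[0])+str(locator[1])
--                 if (tempString not in classPair_map):
--                     classPair_map[tempString] = [0,0]
--     return classPair_map
-- ===== SOURCE B (Python) =====
-- def makeClassPairMap(multiclass_map):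
--     # idiomatic: one pass over the distinct unordered key pairs (upper triangle),
--     # no symmetric re-visit, no membership guard, max/min instead of sorted()
--     keys = list(multiclass_map)
--     return {str(max(x, y)) + str(min(x, y)): [0, 0]
--             for i, x in enumerate(keys)
--             for y in keys[i + 1:]}
-- ===== Notes on version B (the rewrite author's own statement) =====
-- stated objective: simpler
-- what changed: Replaces A's full nested scan over all ordered key pairs with its '!=' and 'not in classPair_map' guards by a single upper-triangle pass (each key paired only with the later keys), assigning str(max)+str(min) directly with no membership check.
import Mathlib
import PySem

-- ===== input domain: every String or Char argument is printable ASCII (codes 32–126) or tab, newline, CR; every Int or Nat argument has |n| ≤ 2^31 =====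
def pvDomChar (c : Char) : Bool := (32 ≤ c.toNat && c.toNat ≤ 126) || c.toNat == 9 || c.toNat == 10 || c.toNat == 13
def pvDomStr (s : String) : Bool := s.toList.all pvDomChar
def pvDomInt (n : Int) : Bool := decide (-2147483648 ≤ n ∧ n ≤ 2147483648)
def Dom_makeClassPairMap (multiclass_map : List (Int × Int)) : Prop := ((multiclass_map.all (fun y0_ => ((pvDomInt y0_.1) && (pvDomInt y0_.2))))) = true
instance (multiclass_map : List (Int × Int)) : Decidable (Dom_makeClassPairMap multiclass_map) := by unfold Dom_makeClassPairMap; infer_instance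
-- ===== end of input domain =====

-- B replaces A's full nested scan with guards by a single pass over the upper-triangle
-- (each key paired only with later keys, max/min instead of sorted): simpler/idiomatic.


-- ===== PORT A =====
-- Iterating the Python dict iterates its (distinct, insertion-ordered) keys: PySem.List.dedup of the fsts.
def makeClassPairMap (multiclass_map : List (Int × Int)) : List (String × List Int) :=
  ((PySem.List.dedup (multiclass_map.map Prod.fst)).foldl (fun cp each =>
    (PySem.List.dedup (multiclass_map.map Prod.fst)).foldl (fun cp other =>
      if each ≠ other then
        let locator : List Int := PySem.List.sorted [each, other] (fun x => x) true
        let tempString := PySem.Int.toStr ((PySem.List.pyGet? locator 0).getD 0)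
                       ++ PySem.Int.toStr ((PySem.List.pyGet? locator 1).getD 0)
        if cp.contains tempString = false then cp.insert tempString ([0, 0] : List Int) else cp
      else cp) cp)
    (PySem.Dict.empty : PySem.Dict String (List Int))).items

-- ===== PORT B =====
def makeClassPairMap_alt (multiclass_map : List (Int × Int)) : List (String × List Int) :=
  ((PySem.List.enumerate (PySem.List.dedup (multiclass_map.map Prod.fst))).foldl (fun cp ix =>
      (PySem.List.slice (PySem.List.dedup (multiclass_map.map Prod.fst)) (some (ix.1 + 1)) none).foldl (fun cp y =>
        cp.insert (PySem.Int.toStr (max ix.2 y) ++ PySem.Int.toStr (min ix.2 y)) ([0, 0] : List Int)) cp)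
    (PySem.Dict.empty : PySem.Dict String (List Int))).items

-- ===== PRECONDITION & SPEC =====
def Spec_makeClassPairMap (multiclass_map : List (Int × Int)) (out : List (String × List Int)) : Prop := out = makeClassPairMap_alt multiclass_map
instance (multiclass_map : List (Int × Int)) (out : List (String × List Int)) : Decidable (Spec_makeClassPairMap multiclass_map out) := by unfold Spec_makeClassPairMap; infer_instance

-- ===== CLAIM (what is proved, stated in full; the proofs are below) =====
def Claim_equal_makeClassPairMap : Prop := ∀ (multiclass_map : List (Int × Int)), Dom_makeClassPairMap multiclass_map → Spec_makeClassPairMap multiclass_map (makeClassPairMap multiclass_map)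

-- ===== LEMMAS AND PROOFS =====

-- the key string both programs build for an unordered pair
def pvKey (a b : Int) : String := PySem.Int.toStr (max a b) ++ PySem.Int.toStr (min a b)

-- A's inner step, with the key written via pvKey
def pvAstep (x : Int) (cp : PySem.Dict String (List Int)) (other : Int) : PySem.Dict String (List Int) :=
  if x ≠ other then
    (if cp.contains (pvKey x other) = false then cp.insert (pvKey x other) ([0, 0] : List Int) else cp)
  else cp

-- the common tail-recursive "upper triangle" computation
def pvT (todo : List Int) (d : PySem.Dict String (List Int)) : PySem.Dict String (List Int) :=
  match todo with
  | [] => d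
  | x :: r => pvT r (r.foldl (fun d y => d.insert (pvKey x y) ([0, 0] : List Int)) d)

theorem pvKey_comm (a b : Int) : pvKey a b = pvKey b a := by
  simp [pvKey, max_comm, min_comm]

theorem sorted_pair (a b : Int) (h : a ≠ b) :
    PySem.List.sorted [a, b] (fun x => x) true = [max a b, min a b] := by
  apply PySem.List.sorted_rev_eq_of_perm_of_pairwise_gt
  · rcases le_total a b with hle | hle
    · simp [max_eq_right hle, min_eq_left hle]
      exact (List.Perm.swap b a []).symm
    · simp [max_eq_left hle, min_eq_right hle]
  · simp
    omega

theorem Astep_eq (x : Int) (cp : PySem.Dict String (List Int)) (other : Int) :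
    (if x ≠ other then
        let locator : List Int := PySem.List.sorted [x, other] (fun t => t) true
        let tempString := PySem.Int.toStr ((PySem.List.pyGet? locator 0).getD 0)
                       ++ PySem.Int.toStr ((PySem.List.pyGet? locator 1).getD 0)
        if cp.contains tempString = false then cp.insert tempString ([0, 0] : List Int) else cp
      else cp) = pvAstep x cp other := by
  by_cases h : x = other
  · simp [pvAstep, h]
  · simp only [pvAstep, ne_eq, h, not_false_eq_true, if_true]
    rw [sorted_pair x other h]
    simp [PySem.List.pyGet?, PySem.List.pyIdx?, pvKey]

-- insert of the value already stored (unique keys) is the identity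
theorem insert_same (d : PySem.Dict String (List Int)) (k : String) (v : List Int)
    (h : d.get? k = some v) (hnd : d.keys.Nodup) : d.insert k v = d := by
  apply PySem.Dict.ext
  have hc : d.contains k = true := by
    rw [PySem.Dict.contains_eq_isSome_get?, h]; rfl
  rw [PySem.Dict.items_insert_of_contains d v hc]
  have : ∀ p ∈ d.items, (if (p.1 == k) = true then (k, v) else p) = p := by
    intro p hp
    by_cases hpk : p.1 = k
    · have hpv : d.get? p.1 = some p.2 := PySem.Dict.get?_of_mem_items d (by rcases p with ⟨a,b⟩; exact hp) hnd
      rw [hpk, h] at hpv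
      rcases p with ⟨a, b⟩
      simp at hpk
      subst hpk
      simp [Option.some_inj.mp hpv]
    · simp [hpk]
  calc (d.items.map (fun p => if (p.1 == k) = true then (k, v) else p)) = d.items.map id := List.map_congr_left (by intro p hp; simpa using this p hp)
    _ = d.items := List.map_id d.items

-- value invariant: every stored value is [0,0]
def pvInv (d : PySem.Dict String (List Int)) : Prop :=
  (∀ v ∈ d.values, v = ([0, 0] : List Int)) ∧ d.keys.Nodup

theorem stepIfAbsent_eq_insert (cp : PySem.Dict String (List Int)) (k : String) (h : pvInv cp) :
    (if cp.contains k = false then cp.insert k ([0, 0] : List Int) else cp)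
      = cp.insert k ([0, 0] : List Int) := by
  by_cases hc : cp.contains k = false
  · simp [hc]
  · have hc' : cp.contains k = true := by revert hc; cases cp.contains k <;> simp
    rw [hc', if_neg (by simp)]
    have ⟨v, hv⟩ : ∃ v, cp.get? k = some v := by
      have := PySem.Dict.contains_eq_isSome_get? (d := cp) (k := k)
      rw [hc'] at this
      cases hg : cp.get? k
      · rw [hg] at this; simp at this
      · exact ⟨_, rfl⟩
    have hmem : (k, v) ∈ cp.items := PySem.Dict.mem_items_of_get?_eq_some cp hv
    have hvv : v ∈ cp.values := by
      have : cp.values = cp.items.map (·.2) := rfl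
      rw [this]; exact List.mem_map_of_mem hmem
    have : v = [0, 0] := h.1 v hvv
    rw [← this]
    exact (insert_same cp k v hv h.2).symm

theorem pvInv_insert (cp : PySem.Dict String (List Int)) (k : String) (h : pvInv cp) :
    pvInv (cp.insert k ([0, 0] : List Int)) := by
  constructor
  · intro v hv
    rcases PySem.Dict.mem_values_insert cp k _ v hv with h1 | h1
    · exact h1
    · exact h.1 v h1
  · exact PySem.Dict.nodup_keys_insert cp k _ h.2

theorem pvInv_foldl (l : List Int) (f : Int → String) :
    ∀ (d : PySem.Dict String (List Int)), pvInv d →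
      pvInv (l.foldl (fun d y => d.insert (f y) ([0, 0] : List Int)) d) := by
  induction l with
  | nil => intro d h; exact h
  | cons y r ih => intro d h; exact ih _ (pvInv_insert d (f y) h)

theorem contains_foldl_mono (l : List Int) (f : Int → String) (k : String) :
    ∀ (d : PySem.Dict String (List Int)), d.contains k = true →
      (l.foldl (fun d y => d.insert (f y) ([0, 0] : List Int)) d).contains k = true := by
  induction l with
  | nil => intro d h; exact h
  | cons y r ih =>
      intro d h
      exact ih _ (by rw [PySem.Dict.contains_insert]; simp [h])

theorem contains_foldl_new (l : List Int) (f : Int → String) (y : Int) (hy : y ∈ l) :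
    ∀ (d : PySem.Dict String (List Int)),
      (l.foldl (fun d y => d.insert (f y) ([0, 0] : List Int)) d).contains (f y) = true := by
  induction l with
  | nil => cases hy
  | cons z r ih =>
      intro d
      rcases List.mem_cons.mp hy with h | h
      · subst h
        exact contains_foldl_mono r f (f y) _ (by rw [PySem.Dict.contains_insert]; simp)
      · exact ih h _

-- invariant carried along A's outer loop
def pvIdone (ks done : List Int) (d : PySem.Dict String (List Int)) : Prop :=
  ∀ p ∈ done, ∀ y ∈ ks, y ≠ p → d.contains (pvKey p y) = true

theorem Arow_skip (x : Int) :
    ∀ (l : List Int) (d : PySem.Dict String (List Int)),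
      (∀ p ∈ l, x ≠ p ∧ d.contains (pvKey x p) = true) → l.foldl (pvAstep x) d = d := by
  intro l
  induction l with
  | nil => intro d _; rfl
  | cons p r ih =>
      intro d h
      have hp := h p (List.mem_cons_self)
      have hstep : pvAstep x d p = d := by
        simp [pvAstep, hp.1, hp.2]
      rw [List.foldl_cons, hstep]
      exact ih d (fun q hq => h q (List.mem_cons_of_mem p hq))

theorem Arow_insert (x : Int) :
    ∀ (l : List Int) (d : PySem.Dict String (List Int)), pvInv d → (∀ y ∈ l, x ≠ y) →
      l.foldl (pvAstep x) d = l.foldl (fun d y => d.insert (pvKey x y) ([0, 0] : List Int)) d := by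
  intro l
  induction l with
  | nil => intro d _ _; rfl
  | cons y r ih =>
      intro d hinv hne
      have hxy := hne y (List.mem_cons_self)
      have hstep : pvAstep x d y = d.insert (pvKey x y) ([0, 0] : List Int) := by
        simp only [pvAstep, ne_eq, hxy, not_false_eq_true, if_true]
        exact stepIfAbsent_eq_insert d (pvKey x y) hinv
      rw [List.foldl_cons, List.foldl_cons, hstep]
      exact ih _ (pvInv_insert d (pvKey x y) hinv) (fun q hq => hne q (List.mem_cons_of_mem y hq))

theorem Arow (ks : List Int) (x : Int) (done rest : List Int) (d : PySem.Dict String (List Int))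
    (hks : ks = done ++ x :: rest) (hnd : ks.Nodup)
    (h1 : pvIdone ks done d) (h2 : pvInv d) :
    ks.foldl (pvAstep x) d = rest.foldl (fun d y => d.insert (pvKey x y) ([0, 0] : List Int)) d := by
  subst hks
  rcases List.nodup_append.mp hnd with ⟨hd, hxr, hdisj⟩
  have hxnotdone : ∀ p ∈ done, x ≠ p := by
    intro p hp heq
    exact hdisj p hp x List.mem_cons_self heq.symm
  have hxmem : x ∈ done ++ x :: rest := List.mem_append_right _ (List.mem_cons_self)
  rw [List.foldl_append]
  rw [Arow_skip x done d (fun p hp =>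
    ⟨hxnotdone p hp, by rw [pvKey_comm]; exact h1 p hp x hxmem (hxnotdone p hp)⟩)]
  rw [List.foldl_cons]
  have hxx : pvAstep x d x = d := by simp [pvAstep]
  rw [hxx]
  exact Arow_insert x rest d h2 (fun y hy heq => (List.nodup_cons.mp hxr).1 (heq ▸ hy))

theorem Amain (ks : List Int) (hnd : ks.Nodup) :
    ∀ (todo done : List Int) (d : PySem.Dict String (List Int)),
      ks = done ++ todo → pvIdone ks done d → pvInv d →
      todo.foldl (fun cp each => ks.foldl (pvAstep each) cp) d = pvT todo d := by
  intro todo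
  induction todo with
  | nil => intro done d _ _ _; rfl
  | cons x r ih =>
      intro done d hks h1 h2
      rw [List.foldl_cons]
      rw [Arow ks x done r d hks hnd h1 h2]
      have hks' : ks = (done ++ [x]) ++ r := by rw [hks]; simp
      have hinv' : pvInv (r.foldl (fun d y => d.insert (pvKey x y) ([0, 0] : List Int)) d) :=
        pvInv_foldl r (pvKey x) d h2
      have h1' : pvIdone ks (done ++ [x]) (r.foldl (fun d y => d.insert (pvKey x y) ([0, 0] : List Int)) d) := by
        intro p hp y hy hne
        rcases List.mem_append.mp hp with hp | hp
        · exact contains_foldl_mono r (pvKey x) _ d (h1 p hp y hy hne)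
        · have hpx : p = x := by simpa using hp
          subst hpx
          rw [hks] at hy
          rcases List.mem_append.mp hy with hy | hy
          · rw [pvKey_comm]
            exact contains_foldl_mono r (pvKey p) (pvKey y p) d
              (h1 y hy p (hks ▸ List.mem_append_right _ List.mem_cons_self)
                (fun h => hne h.symm))
          · rcases List.mem_cons.mp hy with hy | hy
            · exact absurd hy hne
            · exact contains_foldl_new r (pvKey p) y hy d
      exact ih (done ++ [x]) _ hks' h1' hinv'

theorem Bmain (full : List Int) :
    ∀ (todo : List Int) (n : Nat) (d : PySem.Dict String (List Int)),
      full.drop n = todo →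
      (PySem.List.enumerate todo (n : Int)).foldl (fun cp ix =>
        (PySem.List.slice full (some (ix.1 + 1)) none).foldl (fun cp y =>
          cp.insert (pvKey ix.2 y) ([0, 0] : List Int)) cp) d = pvT todo d := by
  intro todo
  induction todo with
  | nil => intro n d _; rfl
  | cons x r ih =>
      intro n d hdrop
      rw [PySem.List.enumerate_cons, List.foldl_cons]
      have hcast : (n : Int) + 1 = ((n + 1 : Nat) : Int) := by push_cast; ring
      have hdrop' : full.drop (n + 1) = r := by
        rw [← List.tail_drop, hdrop, List.tail_cons]
      have hslice : PySem.List.slice full (some ((n + 1 : Nat) : Int)) none = r := by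
        rw [PySem.List.slice_from_natCast, hdrop']
      simp only [hcast]
      rw [hslice]
      exact ih (n + 1) _ hdrop'

-- ===== VERDICT (by name: the statement is the Claim_ definition above) =====
theorem pvInv_empty : pvInv (PySem.Dict.empty : PySem.Dict String (List Int)) := by
  constructor
  · intro v hv
    simp [PySem.Dict.empty, PySem.Dict.values] at hv
  · exact PySem.Dict.nodup_keys_empty

theorem makeClassPairMap_spec : Claim_equal_makeClassPairMap := by
  intro m _
  unfold Spec_makeClassPairMap makeClassPairMap makeClassPairMap_alt
  have hnd : (PySem.List.dedup (m.map Prod.fst)).Nodup := PySem.List.nodup_dedup _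
  set ks := PySem.List.dedup (m.map Prod.fst) with hks
  have houter : (fun (cp : PySem.Dict String (List Int)) each => ks.foldl (fun cp other =>
      if each ≠ other then
        let locator : List Int := PySem.List.sorted [each, other] (fun x => x) true
        let tempString := PySem.Int.toStr ((PySem.List.pyGet? locator 0).getD 0)
                       ++ PySem.Int.toStr ((PySem.List.pyGet? locator 1).getD 0)
        if cp.contains tempString = false then cp.insert tempString ([0, 0] : List Int) else cp
      else cp) cp)
      = (fun cp each => ks.foldl (pvAstep each) cp) := by
    funext cp each
    congr 1
    funext cp' other
    exact Astep_eq each cp' other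
  rw [houter]
  rw [Amain ks hnd ks [] PySem.Dict.empty rfl (fun p hp => absurd hp (List.not_mem_nil)) pvInv_empty]
  exact (congrArg PySem.Dict.items
    (Bmain ks ks 0 PySem.Dict.empty (by simp))).symm
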